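-- pv_equiv track=rewrite | github.com/GeKtoRiX/kokoroTTS | kokoro_tts/storage/morphology_repository.py | _build_pos_table_from_entries
-- ===== SOURCE A (Python) =====
-- from typing import Any, Callable, Iterable, Sequence
--
-- POS_TABLE_COLUMNS: list[tuple[str, str]] = [
--     ("Noun", "NOUN"),
--     ("Verb", "VERB"),
--     ("Adjective", "ADJ"),
--     ("Adverb", "ADV"),
--     ("Pronoun", "PRON"),
--     ("ProperNoun", "PROPN"),
--     ("Number", "NUM"),
--     ("Determiner", "DET"),
--     ("Adposition", "ADP"),
--     ("CConj", "CCONJ"),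
--     ("SConj", "SCONJ"),
--     ("Particle", "PART"),
--     ("Interjection", "INTJ"),
--     ("Symbol", "SYM"),
--     ("Other", "X"),
-- ]
--
-- def _build_pos_table_from_entries(
--     entries: Sequence[tuple[object, object]],
-- ) -> tuple[list[str], list[list[str]]]:
--     by_upos: dict[str, list[str]] = {}
--     seen_by_upos: dict[str, set[str]] = {}
--     for upos, lemma in entries:
--         upos_text = str(upos or "").strip().upper()
--         lemma_text = str(lemma or "").strip()
--         if not upos_text or not lemma_text:
--             continue
--         seen = seen_by_upos.setdefault(upos_text, set())
--         if lemma_text in seen: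
--             continue
--         seen.add(lemma_text)
--         by_upos.setdefault(upos_text, []).append(lemma_text)
--
--     if not by_upos:
--         return [], []
--     column_pairs = _resolve_pos_column_pairs(by_upos)
--     headers = [label for label, _ in column_pairs]
--     max_rows = max((len(by_upos.get(upos, [])) for _, upos in column_pairs), default=0)
--     if max_rows == 0:
--         return [], []
--
--     rows: list[list[str]] = []
--     for row_index in range(max_rows):
--         row: list[str] = []
--         for _, upos in column_pairs:
--             words = by_upos.get(upos, [])
--             row.append(words[row_index] if row_index < len(words) else "")
--         rows.append(row)
--     return headers, rows
--
-- def _resolve_pos_column_pairs(by_upos: dict[str, list[str]]) -> list[tuple[str, str]]: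
--     column_pairs = list(POS_TABLE_COLUMNS)
--     known_upos = {upos for _, upos in column_pairs}
--     extra_upos = sorted([upos for upos in by_upos if upos not in known_upos])
--     for upos in extra_upos:
--         column_pairs.append((upos, upos))
--     return column_pairs
-- ===== SOURCE B (Python) =====
-- POS_TABLE_COLUMNS: list[tuple[str, str]] = [
--     ("Noun", "NOUN"),
--     ("Verb", "VERB"),
--     ("Adjective", "ADJ"),
--     ("Adverb", "ADV"),
--     ("Pronoun", "PRON"),
--     ("ProperNoun", "PROPN"),
--     ("Number", "NUM"),
--     ("Determiner", "DET"),
--     ("Adposition", "ADP"),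
--     ("CConj", "CCONJ"),
--     ("SConj", "SCONJ"),
--     ("Particle", "PART"),
--     ("Interjection", "INTJ"),
--     ("Symbol", "SYM"),
--     ("Other", "X"),
-- ]
--
--
-- def _resolve_pos_column_pairs(by_upos):
--     column_pairs = list(POS_TABLE_COLUMNS)
--     known_upos = {upos for _, upos in column_pairs}
--     for upos in sorted(u for u in by_upos if u not in known_upos):
--         column_pairs.append((upos, upos))
--     return column_pairs
--
--
-- def _build_pos_table_from_entries(entries):
--     by_upos: dict[str, list[str]] = {}
--     seen_by_upos: dict[str, set[str]] = {}
--     for upos, lemma in entries: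
--         upos_text = str(upos or "").strip().upper()
--         lemma_text = str(lemma or "").strip()
--         if not upos_text or not lemma_text:
--             continue
--         seen = seen_by_upos.setdefault(upos_text, set())
--         if lemma_text in seen:
--             continue
--         seen.add(lemma_text)
--         by_upos.setdefault(upos_text, []).append(lemma_text)
--
--     column_pairs = _resolve_pos_column_pairs(by_upos)
--     headers = [label for label, _ in column_pairs]
--     # columnar transpose: repeatedly strip the head of every column
--     columns = [by_upos.get(upos, []) for _, upos in column_pairs]
--     rows: list[list[str]] = []
--     while not all(len(c) == 0 for c in columns):
--         rows.append([c[0] if c else "" for c in columns])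
--         columns = [c[1:] for c in columns]
--     if not rows:
--         return [], []
--     return headers, rows
-- ===== Notes on version B (the rewrite author's own statement) =====
-- stated objective: simpler
-- what changed: Replaces A's empty-dict early return, max_rows computation and index-based nested row loop (with per-cell bounds checks) by building the per-POS column lists once and transposing them head-by-head (strip the first element of every column until all columns are empty), returning empty headers and rows when no row was produced.
import Mathlib
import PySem

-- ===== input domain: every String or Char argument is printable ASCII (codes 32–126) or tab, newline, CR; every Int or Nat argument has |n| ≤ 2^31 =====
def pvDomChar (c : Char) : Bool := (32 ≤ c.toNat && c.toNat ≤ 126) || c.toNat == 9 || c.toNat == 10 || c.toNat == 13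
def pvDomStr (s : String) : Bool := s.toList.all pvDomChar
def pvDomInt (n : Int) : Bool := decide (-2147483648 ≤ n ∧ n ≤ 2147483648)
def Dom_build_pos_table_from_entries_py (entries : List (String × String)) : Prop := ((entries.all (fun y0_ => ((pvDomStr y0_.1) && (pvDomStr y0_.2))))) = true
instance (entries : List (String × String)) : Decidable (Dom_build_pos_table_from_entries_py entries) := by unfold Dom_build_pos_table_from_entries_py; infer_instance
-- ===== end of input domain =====

-- B replaces A's empty-dict check, max_rows computation and index-based nested row loop by a
-- head/tail columnar transpose (strip the first element of every column until all are empty);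
-- objective: simpler decomposition, same cost.

-- ===== PORT A =====
def POS_TABLE_COLUMNS : List (String × String) := [
  ("Noun", "NOUN"), ("Verb", "VERB"), ("Adjective", "ADJ"), ("Adverb", "ADV"),
  ("Pronoun", "PRON"), ("ProperNoun", "PROPN"), ("Number", "NUM"), ("Determiner", "DET"),
  ("Adposition", "ADP"), ("CConj", "CCONJ"), ("SConj", "SCONJ"), ("Particle", "PART"),
  ("Interjection", "INTJ"), ("Symbol", "SYM"), ("Other", "X")]

-- the shared dedup-aggregation loop (identical in A and B); returns by_upos
def buildByUpos (entries : List (String × String)) : PySem.Dict String (List String) :=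
  (entries.foldl (fun st e =>
    let upos_text := PySem.Str.upper (PySem.Str.strip e.1)
    let lemma_text := PySem.Str.strip e.2
    if upos_text = "" ∨ lemma_text = "" then st
    else
      let seen := (st.2).getD upos_text PySem.Set.empty
      if PySem.Set.contains seen lemma_text then st
      else (st.1.insert upos_text ((st.1).getD upos_text [] ++ [lemma_text]),
            st.2.insert upos_text (PySem.Set.add seen lemma_text)))
    ((PySem.Dict.empty : PySem.Dict String (List String)),
     (PySem.Dict.empty : PySem.Dict String (PySem.Set String)))).1

def resolvePosColumnPairs (by_upos : PySem.Dict String (List String)) : List (String × String) :=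
  let known_upos := PySem.Set.ofList (POS_TABLE_COLUMNS.map (·.2))
  let extra_upos := PySem.List.sorted
    (by_upos.keys.filter (fun u => !(PySem.Set.contains known_upos u))) (fun x => x) false
  POS_TABLE_COLUMNS ++ extra_upos.map (fun u => (u, u))

def build_pos_table_from_entries_py (entries : List (String × String)) :
    List String × List (List String) :=
  let by_upos := buildByUpos entries
  if by_upos.items = [] then ([], [])
  else
    let column_pairs := resolvePosColumnPairs by_upos
    let headers := column_pairs.map (·.1)
    let max_rows := (column_pairs.map (fun p => (by_upos.getD p.2 []).length)).foldl Nat.max 0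
    if max_rows = 0 then ([], [])
    else
      let rows := (List.range max_rows).map (fun row_index =>
        column_pairs.map (fun p =>
          let words := by_upos.getD p.2 []
          if row_index < words.length then words.getD row_index "" else ""))
      (headers, rows)

-- ===== PORT B =====
-- termination helper for the transpose: stripping heads shrinks the total length
theorem sumLen_tails_lt (cols : List (List String))
    (h : ¬ cols.all (·.isEmpty) = true) :
    ((cols.map List.tail).map List.length).sum < (cols.map List.length).sum := by
  induction cols with
  | nil => simp at h
  | cons c cs ih =>
    simp only [List.all_cons, Bool.and_eq_true] at h
    by_cases hc : c.isEmpty = true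
    · have := ih (by tauto)
      cases c <;> simp_all
    · have hlt : c.tail.length < c.length := by
        cases c <;> simp_all
      have hle : ((cs.map List.tail).map List.length).sum ≤ (cs.map List.length).sum := by
        clear h ih; induction cs with
        | nil => simp
        | cons d ds ih2 =>
          have : d.tail.length ≤ d.length := by cases d <;> simp
          simp only [List.map_cons, List.sum_cons]; omega
      simp only [List.map_cons, List.sum_cons]; omega

def zipLongestT (cols : List (List String)) : List (List String) :=
  if h : cols.all (·.isEmpty) = true then []
  else cols.map (fun c => c.headD "") :: zipLongestT (cols.map List.tail)
termination_by (cols.map List.length).sum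
decreasing_by simpa using sumLen_tails_lt cols h

def build_pos_table_from_entries_py_alt (entries : List (String × String)) :
    List String × List (List String) :=
  let by_upos := buildByUpos entries
  let column_pairs := resolvePosColumnPairs by_upos
  let headers := column_pairs.map (·.1)
  let columns := column_pairs.map (fun p => by_upos.getD p.2 [])
  let rows := zipLongestT columns
  if rows = [] then ([], []) else (headers, rows)

-- ===== PRECONDITION & SPEC =====
def Spec_build_pos_table_from_entries_py (entries : List (String × String)) (out : List String × List (List String)) : Prop := out = build_pos_table_from_entries_py_alt entries
instance (entries : List (String × String)) (out : List String × List (List String)) : Decidable (Spec_build_pos_table_from_entries_py entries out) := by unfold Spec_build_pos_table_from_entries_py; infer_instance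

-- ===== CLAIM (what is proved, stated in full; the proofs are below) =====
def Claim_equal_build_pos_table_from_entries_py : Prop := ∀ (entries : List (String × String)), Dom_build_pos_table_from_entries_py entries → Spec_build_pos_table_from_entries_py entries (build_pos_table_from_entries_py entries)

-- ===== LEMMAS AND PROOFS =====

-- max column length, on the columns themselves
def maxLen (cols : List (List String)) : Nat := (cols.map List.length).foldl Nat.max 0

theorem foldl_max_eq_zero_iff (l : List Nat) (a : Nat) :
    l.foldl Nat.max a = 0 ↔ a = 0 ∧ ∀ x ∈ l, x = 0 := by
  induction l generalizing a with
  | nil => simp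
  | cons x xs ih => simp [List.foldl_cons, ih, Nat.max_eq_zero_iff]; tauto

theorem maxLen_eq_zero_iff (cols : List (List String)) :
    maxLen cols = 0 ↔ cols.all (·.isEmpty) = true := by
  simp [maxLen, foldl_max_eq_zero_iff, List.all_eq_true, List.isEmpty_iff,
    List.length_eq_zero_iff]

theorem foldl_max_pred (l : List Nat) (a : Nat) :
    (l.map (· - 1)).foldl Nat.max (a - 1) = l.foldl Nat.max a - 1 := by
  induction l generalizing a with
  | nil => simp
  | cons x xs ih =>
    simp only [List.map_cons, List.foldl_cons]
    have : Nat.max (a - 1) (x - 1) = Nat.max a x - 1 := by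
      simp only [Nat.max_def]; split_ifs <;> omega
    rw [this, ih]

theorem maxLen_tails (cols : List (List String)) :
    maxLen (cols.map List.tail) = maxLen cols - 1 := by
  have h1 : (cols.map List.tail).map List.length = (cols.map List.length).map (· - 1) := by
    simp [List.map_map, Function.comp]
  simp only [maxLen, h1]
  simpa using foldl_max_pred (cols.map List.length) 0

theorem getD_tail (ws : List String) (i : Nat) :
    ws.tail.getD i "" = ws.getD (i + 1) "" := by
  cases ws <;> simp [List.getD]

theorem headD_eq_getD_zero (ws : List String) : ws.headD "" = ws.getD 0 "" := by
  cases ws <;> simp [List.getD]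

-- the transpose produces exactly A's index-built rows
theorem zipLongestT_eq_aux : ∀ (n : Nat) (cols : List (List String)),
    (cols.map List.length).sum ≤ n →
    zipLongestT cols =
      (List.range (maxLen cols)).map (fun i => cols.map (fun ws => ws.getD i "")) := by
  intro n
  induction n with
  | zero =>
    intro cols hle
    have hall : cols.all (·.isEmpty) = true := by
      simp only [List.all_eq_true, List.isEmpty_iff, ← List.length_eq_zero_iff]
      intro ws hws
      have hz : (cols.map List.length).sum = 0 := Nat.le_zero.1 hle
      exact List.sum_eq_zero_iff.1 hz _ (List.mem_map_of_mem hws)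
    rw [zipLongestT]
    simp [hall, (maxLen_eq_zero_iff cols).2 hall]
  | succ n ih =>
    intro cols hle
    rw [zipLongestT]
    by_cases h : cols.all (·.isEmpty) = true
    · simp [h, (maxLen_eq_zero_iff cols).2 h]
    · have hml : maxLen cols ≠ 0 := fun hz => h ((maxLen_eq_zero_iff cols).1 hz)
      obtain ⟨m, hm⟩ : ∃ m, maxLen cols = m + 1 := ⟨maxLen cols - 1, by omega⟩
      have hmt : maxLen (cols.map List.tail) = m := by rw [maxLen_tails, hm]; omega
      have hrec := ih (cols.map List.tail) (by
        have := sumLen_tails_lt cols h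
        omega)
      rw [dif_neg h, hrec, hmt, hm, List.range_succ_eq_map, List.map_cons, List.map_map]
      congr 1
      · exact List.map_congr_left (fun ws _ => headD_eq_getD_zero ws)
      · apply List.map_congr_left
        intro i _
        simp only [Function.comp_def, List.map_map]
        exact List.map_congr_left (fun ws _ => getD_tail ws i)

theorem zipLongestT_eq (cols : List (List String)) :
    zipLongestT cols =
      (List.range (maxLen cols)).map (fun i => cols.map (fun ws => ws.getD i "")) :=
  zipLongestT_eq_aux ((cols.map List.length).sum) cols le_rfl

theorem getD_of_items_nil (d : PySem.Dict String (List String)) (h : d.items = [])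
    (k : String) : d.getD k [] = [] := by
  cases d with
  | mk items => simp at h; subst h; rfl

theorem if_lt_getD (ws : List String) (i : Nat) :
    (if i < ws.length then ws.getD i "" else "") = ws.getD i "" := by
  split_ifs with h
  · rfl
  · rw [List.getD_eq_default]; omega

-- ===== VERDICT (by name: the statement is the Claim_ definition above) =====
theorem build_pos_table_from_entries_py_spec : Claim_equal_build_pos_table_from_entries_py := by
  intro entries _
  unfold Spec_build_pos_table_from_entries_py
  simp only [build_pos_table_from_entries_py, build_pos_table_from_entries_py_alt]
  generalize buildByUpos entries = d
  have hmax : (List.map (fun p => (d.getD p.2 []).length) (resolvePosColumnPairs d)).foldl Nat.max 0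
      = maxLen (List.map (fun p => d.getD p.2 []) (resolvePosColumnPairs d)) := by
    simp [maxLen, List.map_map, Function.comp_def]
  have hrows := zipLongestT_eq (List.map (fun p => d.getD p.2 []) (resolvePosColumnPairs d))
  by_cases hnil : d.items = []
  · -- A's early return; B's columns are all empty, so the transpose is empty too
    have hcempty : (List.map (fun p => d.getD p.2 []) (resolvePosColumnPairs d)).all
        (·.isEmpty) = true := by
      simp only [List.all_eq_true]
      intro ws hws
      obtain ⟨p, _, hp⟩ := List.mem_map.1 hws
      rw [← hp, getD_of_items_nil d hnil]; rfl
    have hz : zipLongestT (List.map (fun p => d.getD p.2 []) (resolvePosColumnPairs d)) = [] := by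
      rw [zipLongestT]; simp [hcempty]
    rw [if_pos hnil, hz, if_pos rfl]
  · rw [if_neg hnil]
    by_cases hz : (List.map (fun p => (d.getD p.2 []).length) (resolvePosColumnPairs d)).foldl
        Nat.max 0 = 0
    · have hz' : zipLongestT (List.map (fun p => d.getD p.2 []) (resolvePosColumnPairs d)) = [] := by
        rw [hrows, ← hmax, hz]; rfl
      rw [if_pos hz, hz', if_pos rfl]
    · have hne : zipLongestT (List.map (fun p => d.getD p.2 []) (resolvePosColumnPairs d)) ≠ [] := by
        rw [hrows]
        simp only [ne_eq, List.map_eq_nil_iff, List.range_eq_nil]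
        rw [← hmax]; exact hz
      rw [if_neg hz, if_neg hne]
      refine congrArg _ ?_
      rw [hrows, ← hmax]
      apply List.map_congr_left
      intro i _
      simp only [List.map_map, Function.comp_def]
      exact List.map_congr_left (fun p _ => if_lt_getD (d.getD p.2 []) i)
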